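-- pv_equiv track=rewrite | github.com/hchiam/cognateLanguage | geneticAlgorithm/geneticAlgo.py | evaluateScore_LettersFromEachSource
-- ===== SOURCE A (Python) =====
-- def evaluateScore_LettersFromEachSource(word,originalWords):
--     score = 0
--     consonantsAlreadyUsed = []
--     for letter in word:
--         # avoid using the same letter again anywhere in the same word:
--         if letter not in consonantsAlreadyUsed:
--             consonantsAlreadyUsed.append(letter)
--             # encourage using words with letters found in all source words:
--             for srcWord in originalWords:
--                 score += 1 if letter in srcWord else 0
--     return score
-- ===== SOURCE B (Python) =====
-- def evaluateScore_LettersFromEachSource(word, originalWords):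
--     letters = set(word)
--     return sum(len(letters & set(src)) for src in originalWords)
-- ===== Notes on version B (the rewrite author's own statement) =====
-- stated objective: simpler
-- what changed: Transposes the double sum: the outer loop runs over the source words and each contributes the size of the intersection of its letter set with the word's letter set, replacing A's per-letter dedup list and inner membership scans.
import Mathlib
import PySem

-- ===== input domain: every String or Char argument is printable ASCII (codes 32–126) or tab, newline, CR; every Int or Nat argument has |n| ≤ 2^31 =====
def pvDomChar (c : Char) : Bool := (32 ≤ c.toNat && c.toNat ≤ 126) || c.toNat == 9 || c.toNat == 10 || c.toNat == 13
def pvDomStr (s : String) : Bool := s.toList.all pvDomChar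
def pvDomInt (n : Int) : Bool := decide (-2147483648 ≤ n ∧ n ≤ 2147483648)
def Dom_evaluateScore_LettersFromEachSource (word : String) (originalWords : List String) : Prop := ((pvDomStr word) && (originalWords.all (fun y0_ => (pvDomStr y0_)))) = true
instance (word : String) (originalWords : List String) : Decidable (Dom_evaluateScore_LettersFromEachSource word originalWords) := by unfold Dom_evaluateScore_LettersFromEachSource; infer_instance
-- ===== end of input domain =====

-- B transposes the double sum: it loops over the source words and adds the size of the
-- intersection of each source word's letter set with the word's letter set (simpler; return value only).

-- ===== PORT A =====
-- literal transliteration of A: fold over word's letters carrying (score, consonantsAlreadyUsed)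
def evaluateScore_LettersFromEachSource (word : String) (originalWords : List String) : Int :=
  (word.toList.foldl
    (fun (st : Int × List Char) letter =>
      if letter ∈ st.2 then st
      else
        (originalWords.foldl
          (fun score srcWord => score + (if letter ∈ srcWord.toList then 1 else 0)) st.1,
         st.2 ++ [letter]))
    ((0 : Int), ([] : List Char))).1

-- ===== PORT B =====
-- literal transliteration of B: sum over source words of |set(word) & set(src)|
def evaluateScore_LettersFromEachSource_alt (word : String) (originalWords : List String) : Int :=
  let letters : PySem.Set Char := PySem.Set.ofList word.toList
  originalWords.foldl
    (fun s src => s + PySem.Set.len (PySem.Set.inter letters (PySem.Set.ofList src.toList))) 0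

-- ===== PRECONDITION & SPEC =====
def Spec_evaluateScore_LettersFromEachSource (word : String) (originalWords : List String) (out : Int) : Prop := out = evaluateScore_LettersFromEachSource_alt word originalWords
instance (word : String) (originalWords : List String) (out : Int) : Decidable (Spec_evaluateScore_LettersFromEachSource word originalWords out) := by unfold Spec_evaluateScore_LettersFromEachSource; infer_instance

-- ===== CLAIM (what is proved, stated in full; the proofs are below) =====
def Claim_equal_evaluateScore_LettersFromEachSource : Prop := ∀ (word : String) (originalWords : List String), Dom_evaluateScore_LettersFromEachSource word originalWords → Spec_evaluateScore_LettersFromEachSource word originalWords (evaluateScore_LettersFromEachSource word originalWords)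

-- ===== LEMMAS AND PROOFS =====

-- ===== VERDICT (by name: the statement is the Claim_ definition above) =====
-- per-letter count of source words containing the letter
def pvCnt (originalWords : List String) (c : Char) : Int :=
  (originalWords.map (fun src => if c ∈ src.toList then (1 : Int) else 0)).sum

theorem pv_foldl_add {α : Type} (l : List α) (f : α → Int) (a : Int) :
    l.foldl (fun s x => s + f x) a = a + (l.map f).sum := by
  induction l generalizing a with
  | nil => simp
  | cons x xs ih => simp [List.foldl_cons, ih, add_assoc]

-- A's loop computes the sum of pvCnt over the not-yet-seen distinct letters
theorem pv_A_loop (originalWords : List String) (l : List Char) (seen : List Char) (acc : Int) :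
    (l.foldl
      (fun (st : Int × List Char) letter =>
        if letter ∈ st.2 then st
        else
          (originalWords.foldl
            (fun score srcWord => score + (if letter ∈ srcWord.toList then 1 else 0)) st.1,
           st.2 ++ [letter]))
      (acc, seen)).1
    = acc + ∑ c ∈ l.toFinset \ seen.toFinset, pvCnt originalWords c := by
  induction l generalizing seen acc with
  | nil => simp
  | cons x l ih =>
    by_cases hx : x ∈ seen
    · have hset : (x :: l).toFinset \ seen.toFinset = l.toFinset \ seen.toFinset := by
        ext c
        simp only [Finset.mem_sdiff, List.mem_toFinset, List.mem_cons]
        constructor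
        · rintro ⟨hc | hc, hcs⟩
          · exact absurd (hc ▸ hx) hcs
          · exact ⟨hc, hcs⟩
        · rintro ⟨hc, hcs⟩; exact ⟨Or.inr hc, hcs⟩
      rw [List.foldl_cons]
      simp only [if_pos hx]
      rw [ih, hset]
    · have hxnot : x ∉ l.toFinset \ (seen ++ [x]).toFinset := by simp
      have hset : (x :: l).toFinset \ seen.toFinset
          = insert x (l.toFinset \ (seen ++ [x]).toFinset) := by
        ext c
        simp only [Finset.mem_sdiff, List.mem_toFinset, List.mem_cons, Finset.mem_insert,
          List.mem_append]
        constructor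
        · rintro ⟨hc | hc, hcs⟩
          · exact Or.inl hc
          · by_cases hcx : c = x
            · exact Or.inl hcx
            · exact Or.inr ⟨hc, by simp [hcs, hcx]⟩
        · rintro (hc | ⟨hc, hcs⟩)
          · exact ⟨Or.inl hc, hc ▸ hx⟩
          · exact ⟨Or.inr hc, fun h => hcs (Or.inl h)⟩
      rw [List.foldl_cons]
      simp only [hx, if_false]
      rw [ih, pv_foldl_add, hset, Finset.sum_insert hxnot]
      simp [pvCnt]; ring

-- counting by a filter over a duplicate-free list equals an indicator sum over its Finset
theorem pv_filter_len (s : List Char) (hs : s.Nodup) (p : Char → Bool) :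
    ((s.filter p).length : Int) = ∑ c ∈ s.toFinset, (if p c then (1 : Int) else 0) := by
  induction s with
  | nil => simp
  | cons a s ih =>
    have ha : a ∉ s := (List.nodup_cons.mp hs).1
    have ha' : a ∉ s.toFinset := by simpa using ha
    rw [List.toFinset_cons, Finset.sum_insert ha']
    by_cases hp : p a
    · simp [hp, ih (List.nodup_cons.mp hs).2]; omega
    · simp [hp, ih (List.nodup_cons.mp hs).2]

theorem pv_sum_swap {α : Type} (l : List α) (F : Finset Char) (g : Char → α → Int) :
    (l.map (fun a => ∑ c ∈ F, g c a)).sum = ∑ c ∈ F, (l.map (g c)).sum := by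
  induction l with
  | nil => simp
  | cons x l ih => simp [ih, Finset.sum_add_distrib]

theorem evaluateScore_LettersFromEachSource_spec : Claim_equal_evaluateScore_LettersFromEachSource := by
  intro word originalWords _
  unfold Spec_evaluateScore_LettersFromEachSource
  unfold evaluateScore_LettersFromEachSource evaluateScore_LettersFromEachSource_alt
  rw [pv_A_loop]
  rw [pv_foldl_add]
  simp only [List.toFinset_nil, Finset.sdiff_empty, zero_add]
  have hF : (PySem.Set.ofList word.toList).toFinset = word.toList.toFinset := by
    ext c; simp [PySem.Set.mem_ofList]
  have hlen : ∀ src : String,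
      PySem.Set.len (PySem.Set.inter (PySem.Set.ofList word.toList)
        (PySem.Set.ofList src.toList))
      = ∑ c ∈ word.toList.toFinset, (if c ∈ src.toList then (1 : Int) else 0) := by
    intro src
    have hinter : PySem.Set.inter (PySem.Set.ofList word.toList) (PySem.Set.ofList src.toList)
        = (PySem.Set.ofList word.toList).filter
            (fun x => PySem.Set.contains (PySem.Set.ofList src.toList) x) := rfl
    have hnd := PySem.Set.nodup_ofList (xs := word.toList)
    rw [PySem.Set.len, hinter, pv_filter_len _ hnd, hF]
    refine Finset.sum_congr rfl (fun c _ => ?_)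
    by_cases hc : c ∈ src.toList <;> simp [PySem.Set.mem_ofList, hc]
  calc ∑ c ∈ word.toList.toFinset, pvCnt originalWords c
      = (originalWords.map (fun src =>
          ∑ c ∈ word.toList.toFinset, (if c ∈ src.toList then (1 : Int) else 0))).sum := by
        rw [pv_sum_swap]; rfl
    _ = (originalWords.map (fun src =>
          PySem.Set.len (PySem.Set.inter (PySem.Set.ofList word.toList)
            (PySem.Set.ofList src.toList)))).sum := by
        congr 1; exact List.map_congr_left (fun src _ => (hlen src).symm)
    _ = _ := by rfl
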